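-- pv_equiv track=rewrite | github.com/strangeloopcanon/Horace | tools/sampler.py | _match_author
-- ===== SOURCE A (Python) =====
-- from typing import Dict, List, Optional, Tuple
--
-- def _match_author(rows: List[Dict], name: str) -> Optional[Dict]:
--     if not rows:
--         return None
--     want = name.strip().lower()
--     # Exact case-insensitive
--     for r in rows:
--         if str(r.get('author', '')).strip().lower() == want:
--             return r
--     # Contains match
--     for r in rows:
--         a = str(r.get('author', '')).strip().lower()
--         if want in a or a in want:
--             return r
--     # Fallback: last token (e.g., "shakespeare")
--     want_tok = want.split()[-1]
--     for r in rows: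
--         a = str(r.get('author', '')).strip().lower()
--         if want_tok in a.split():
--             return r
--     return None
-- ===== SOURCE B (Python) =====
-- def _match_author(rows, name):
--     want = name.strip().lower()
--     toks = want.split()
--     want_tok = toks[-1] if toks else None
--     cand_contains = None
--     cand_token = None
--     for r in rows:
--         a = str(r.get('author', '')).strip().lower()
--         if a == want:
--             return r
--         if cand_contains is None and (want in a or a in want):
--             cand_contains = r
--         if cand_token is None and want_tok is not None and want_tok in a.split():
--             cand_token = r
--     return cand_contains if cand_contains is not None else cand_token
-- ===== Notes on version B (the rewrite author's own statement) =====
-- stated objective: alternative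
-- what changed: Replaces A's three sequential full scans (exact, contains, last-token tiers) by a single pass that returns immediately on an exact match and otherwise remembers the first contains-match and first token-match candidates, resolving the tiers after the loop.
import Mathlib
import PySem

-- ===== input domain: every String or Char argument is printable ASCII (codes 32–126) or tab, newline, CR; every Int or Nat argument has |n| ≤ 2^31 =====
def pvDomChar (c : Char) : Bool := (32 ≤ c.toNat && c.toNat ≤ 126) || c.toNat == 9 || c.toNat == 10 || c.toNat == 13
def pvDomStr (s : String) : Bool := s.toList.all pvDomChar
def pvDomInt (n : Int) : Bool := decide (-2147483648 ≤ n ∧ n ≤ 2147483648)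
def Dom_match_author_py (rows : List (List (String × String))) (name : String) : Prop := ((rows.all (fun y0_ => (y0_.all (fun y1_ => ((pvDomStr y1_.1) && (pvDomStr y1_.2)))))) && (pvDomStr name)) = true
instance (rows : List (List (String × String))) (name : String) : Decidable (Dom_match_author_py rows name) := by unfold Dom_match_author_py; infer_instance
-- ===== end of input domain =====

-- B replaces A's three sequential scans by a single pass keeping per-tier candidates (same results, different traversal).

-- r.get('author', '') : first-match lookup in the association list (Python dict semantics)
def pvGetAuthor (r : List (String × String)) : String :=
  match r with
  | [] => ""
  | (k, v) :: rest => if k = "author" then v else pvGetAuthor rest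

-- str(r.get('author','')).strip().lower() (str() on a string is the identity)
def pvNorm (r : List (String × String)) : String :=
  PySem.Str.lower (PySem.Str.strip (pvGetAuthor r))

-- ===== PORT A =====
-- first loop of A: exact case-insensitive match
def pvFindExact (rows : List (List (String × String))) (want : String) : Option (List (String × String)) :=
  match rows with
  | [] => none
  | r :: rs => if pvNorm r = want then some r else pvFindExact rs want

-- second loop of A: contains match
def pvFindContains (rows : List (List (String × String))) (want : String) : Option (List (String × String)) :=
  match rows with
  | [] => none
  | r :: rs =>
      let a := pvNorm r
      if PySem.Str.isIn want a || PySem.Str.isIn a want then some r else pvFindContains rs want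

-- third loop of A: last-token match
def pvFindToken (rows : List (List (String × String))) (tok : String) : Option (List (String × String)) :=
  match rows with
  | [] => none
  | r :: rs =>
      let a := pvNorm r
      if tok ∈ PySem.Str.split₀ a then some r else pvFindToken rs tok

def match_author_py (rows : List (List (String × String))) (name : String) : Option (List (String × String)) :=
  if rows = [] then none
  else
    let want := PySem.Str.lower (PySem.Str.strip name)
    match pvFindExact rows want with
    | some r => some r
    | none =>
        match pvFindContains rows want with
        | some r => some r
        | none =>
            -- want.split()[-1]; the 'none' case is Python's IndexError, unreachable: with want = ''
            -- the contains loop already returned the first row (and rows ≠ [] here)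
            match PySem.List.pyGet? (PySem.Str.split₀ want) (-1) with
            | none => none
            | some tok => pvFindToken rows tok

-- ===== PORT B =====
-- single pass: return on exact match, remember first contains / first token candidates
def pvLoop (want : String) (tok? : Option String) :
    List (List (String × String)) → Option (List (String × String)) → Option (List (String × String)) → Option (List (String × String))
  | [], c1, c2 => match c1 with | some r => some r | none => c2
  | r :: rs, c1, c2 =>
      let a := pvNorm r
      if a = want then some r
      else
        let c1' := match c1 with
          | some _ => c1
          | none => if PySem.Str.isIn want a || PySem.Str.isIn a want then some r else none
        let c2' := match c2 with
          | some _ => c2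
          | none =>
              match tok? with
              | some t => if t ∈ PySem.Str.split₀ a then some r else none
              | none => none
        pvLoop want tok? rs c1' c2'

def match_author_py_alt (rows : List (List (String × String))) (name : String) : Option (List (String × String)) :=
  let want := PySem.Str.lower (PySem.Str.strip name)
  let tok? := PySem.List.pyGet? (PySem.Str.split₀ want) (-1)   -- toks[-1] if toks else None
  pvLoop want tok? rows none none

-- ===== PRECONDITION & SPEC =====
def Spec_match_author_py (rows : List (List (String × String))) (name : String) (out : Option (List (String × String))) : Prop := out = match_author_py_alt rows name
instance (rows : List (List (String × String))) (name : String) (out : Option (List (String × String))) : Decidable (Spec_match_author_py rows name out) := by unfold Spec_match_author_py; infer_instance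

-- ===== CLAIM (what is proved, stated in full; the proofs are below) =====
def Claim_equal_match_author_py : Prop := ∀ (rows : List (List (String × String))) (name : String), Dom_match_author_py rows name → Spec_match_author_py rows name (match_author_py rows name)

-- ===== LEMMAS AND PROOFS =====

-- first-some choice, used to state the loop invariant
def pvOrO {α : Type} (a b : Option α) : Option α :=
  match a with | some x => some x | none => b

theorem pvOrO_none_right {α : Type} (a : Option α) : pvOrO a none = a := by
  cases a <;> rfl

-- the single pass with pending candidates c1, c2 computes: the first exact match if any,
-- otherwise (c1 else first contains match) else (c2 else first token match)
theorem pvLoop_eq (want : String) (tok? : Option String) :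
    ∀ (rows : List (List (String × String))) (c1 c2 : Option (List (String × String))),
      pvLoop want tok? rows c1 c2 =
        match pvFindExact rows want with
        | some r => some r
        | none =>
            pvOrO (pvOrO c1 (pvFindContains rows want))
              (pvOrO c2 (match tok? with | some t => pvFindToken rows t | none => none)) := by
  intro rows
  induction rows with
  | nil =>
      intro c1 c2
      simp [pvLoop, pvFindExact, pvFindContains, pvFindToken, pvOrO_none_right]
      cases tok? <;> cases c1 <;> cases c2 <;> rfl
  | cons r rs ih =>
      intro c1 c2
      simp only [pvLoop, pvFindExact, pvFindContains, pvFindToken]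
      by_cases hx : pvNorm r = want
      · simp [hx]
      · simp only [hx, if_false]
        rw [ih]
        cases c1 <;> cases c2 <;> cases tok? <;>
          simp [pvOrO] <;> split_ifs <;> simp [pvOrO]

-- ===== VERDICT (by name: the statement is the Claim_ definition above) =====
theorem match_author_py_spec : Claim_equal_match_author_py := by
  intro rows name _
  unfold Spec_match_author_py match_author_py match_author_py_alt
  rw [pvLoop_eq]
  cases rows with
  | nil =>
      cases PySem.List.pyGet? (PySem.Str.split₀ (PySem.Str.lower (PySem.Str.strip name))) (-1) <;>
        simp [pvFindExact, pvFindContains, pvFindToken, pvOrO]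
  | cons r rs =>
      simp only [if_neg (by simp : (r :: rs : List _) ≠ [])]
      cases hE : pvFindExact (r :: rs) (PySem.Str.lower (PySem.Str.strip name)) with
      | some x => simp
      | none =>
          simp only [pvOrO]
          cases hC : pvFindContains (r :: rs) (PySem.Str.lower (PySem.Str.strip name)) with
          | some x => simp
          | none =>
              cases PySem.List.pyGet? (PySem.Str.split₀ (PySem.Str.lower (PySem.Str.strip name))) (-1) <;>
                simp
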